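-- pv_equiv track=rewrite | github.com/bangcorrupt/hacktribe | scripts/utils/e2_syx_codec.py | syx_enc
-- ===== SOURCE A (Python) =====
-- def syx_enc(byt):
--
--     lng = len(byt)
--     lst = []
--     tmp = []
--     b = 0
--     cnt = 7
--     lim = 0
--     for i,e in enumerate(byt):
--
--         if lng < 7:
--             lim = 7 - lng
--
--         a = e & ~0b10000000
--         b |= ((e & 0b10000000)>>cnt)
--
--         tmp.append(a)
--
--         cnt -= 1
--         if cnt == lim:
--             lst.append([b])
--             lst.append(tmp)
--             tmp = []
--             b = 0
--             cnt = 7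
--
--             if (lng - i) < 7:
--                 lim = 7 - (lng - i) + 1
--
--     syx = [item for sublist in lst for item in sublist]
--
--     return syx
-- ===== SOURCE B (Python) =====
-- def syx_enc(byt):
--     out = []
--     for i in range(0, len(byt), 7):
--         chunk = byt[i:i + 7]
--         msb = 0
--         for j, c in enumerate(chunk):
--             msb |= ((c >> 7) & 1) << j
--         out.append(msb)
--         out.extend(c & ~0x80 for c in chunk)
--     return out
-- ===== Notes on version B (the rewrite author's own statement) =====
-- stated objective: simpler
-- what changed: Replaces A's single-pass cnt/b/lim state machine (with its lim bookkeeping and nested list flattening) by a plain loop over 7-byte chunks that emits each chunk's MSB byte followed by the masked bytes; this also fixes A's dropped final chunk when len % 7 == 6.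
-- intended difference: On inputs with len >= 7 and len % 7 == 6, A's 'lng - i < 7' test never arms the flush for the remaining 6 bytes, so A silently drops the last 6 input bytes (returning only the full 7-byte groups); B encodes the final 6-byte group too, which is the intended sysex encoding. — e.g. on syx_enc([0, 0, 0, 0, 0, 0, 0, 0, 0, 0, 0, 0, 0]): A returns [0, 0, 0, 0, 0, 0, 0, 0], B returns [0, 0, 0, 0, 0, 0, 0, 0, 0, 0, 0, 0, 0, 0, 0]
import Mathlib
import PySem

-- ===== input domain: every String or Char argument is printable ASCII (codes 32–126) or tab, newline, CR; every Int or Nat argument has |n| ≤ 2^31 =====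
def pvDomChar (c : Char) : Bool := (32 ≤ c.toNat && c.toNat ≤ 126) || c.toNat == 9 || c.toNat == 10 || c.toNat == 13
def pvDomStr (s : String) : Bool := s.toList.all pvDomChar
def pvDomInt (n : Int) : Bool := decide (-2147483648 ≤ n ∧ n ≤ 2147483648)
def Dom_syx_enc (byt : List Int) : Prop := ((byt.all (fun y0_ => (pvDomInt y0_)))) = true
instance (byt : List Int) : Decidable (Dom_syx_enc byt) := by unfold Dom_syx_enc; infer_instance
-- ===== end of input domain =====

-- B replaces A's single-pass cnt/b/lim state machine by a plain loop over 7-byte chunks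
-- (objective: simpler), and it encodes the final 6-byte group that A silently drops when
-- len % 7 == 6 (that intended difference is stated as D_syx_enc below).

-- ===== PORT A =====
-- one iteration of A's for-loop over enumerate(byt); state = (lst, tmp, b, cnt, lim)
def syxStep (lng : Int) (s : List (List Int) × List Int × Int × Int × Int) (ie : Int × Int) :
    List (List Int) × List Int × Int × Int × Int :=
  match s, ie with
  | (lst, tmp, b, cnt, lim), (i, e) =>
    let lim := if lng < 7 then 7 - lng else lim
    let a := PySem.Int.band e (Int.not 128)
    let b := PySem.Int.bor b ((PySem.Int.band e 128) >>> cnt.toNat)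
    let tmp := tmp ++ [a]
    let cnt := cnt - 1
    if cnt = lim then
      (lst ++ [[b], tmp], [], 0, 7, if lng - i < 7 then 7 - (lng - i) + 1 else lim)
    else
      (lst, tmp, b, cnt, lim)

def syx_enc (byt : List Int) : List Int :=
  let lng : Int := byt.length
  let r := (PySem.List.enumerate byt).foldl (syxStep lng) ([], [], 0, 7, 0)
  r.1.flatten

-- ===== PORT B =====
-- msb byte of a chunk: msb |= ((c >> 7) & 1) << j
def syxMsb (chunk : List Int) : Int :=
  (PySem.List.enumerate chunk).foldl
    (fun m jc =>
      match jc with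
      | (j, c) => PySem.Int.bor m ((PySem.Int.band (c >>> (7 : Nat)) 1) <<< j.toNat)) 0

def syx_enc_alt (byt : List Int) : List Int :=
  (PySem.List.pyRange 0 byt.length 7).foldl
    (fun out i =>
      let chunk := PySem.List.slice byt (some i) (some (i + 7))
      (out ++ [syxMsb chunk]) ++ chunk.map (fun c => PySem.Int.band c (Int.not 128)))
    []

-- ===== PRECONDITION & SPEC =====
-- On inputs with len ≥ 7 and len % 7 = 6, A's 'lng - i < 7' test never arms the flush for the
-- remaining 6 bytes, so A silently drops the last 6 input bytes; B encodes the final 6-byte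
-- group too, which is the intended sysex encoding.
def D_syx_enc (byt : List Int) : Prop := 7 ≤ byt.length ∧ byt.length % 7 = 6
instance (byt : List Int) : Decidable (D_syx_enc byt) := by unfold D_syx_enc; infer_instance

def Spec_syx_enc (byt : List Int) (out : List Int) : Prop := ¬ D_syx_enc byt → out = syx_enc_alt byt
instance (byt : List Int) (out : List Int) : Decidable (Spec_syx_enc byt out) := by unfold Spec_syx_enc; infer_instance

def pvDiffWitness_syx_enc : List Int := [0, 0, 0, 0, 0, 0, 0, 0, 0, 0, 0, 0, 0]
def pvDiffWitnessOut_syx_enc : (List Int) × (List Int) :=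
  ([0, 0, 0, 0, 0, 0, 0, 0], [0, 0, 0, 0, 0, 0, 0, 0, 0, 0, 0, 0, 0, 0, 0])

-- ===== CLAIM (what is proved, stated in full; the proofs are below) =====
def Claim_unchanged_syx_enc : Prop := ∀ (byt : List Int), Dom_syx_enc byt → Spec_syx_enc byt (syx_enc byt)
def Claim_changed_syx_enc : Prop := Dom_syx_enc (pvDiffWitness_syx_enc) ∧ D_syx_enc (pvDiffWitness_syx_enc) ∧ syx_enc (pvDiffWitness_syx_enc) = pvDiffWitnessOut_syx_enc.1 ∧ syx_enc_alt (pvDiffWitness_syx_enc) = pvDiffWitnessOut_syx_enc.2 ∧ pvDiffWitnessOut_syx_enc.1 ≠ pvDiffWitnessOut_syx_enc.2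
def Claim_exact_syx_enc : Prop := ∀ (byt : List Int), Dom_syx_enc byt → D_syx_enc byt → syx_enc byt ≠ syx_enc_alt byt

-- ===== LEMMAS AND PROOFS =====

-- Nat-level bit facts for the high bit
lemma nat_hi (n : Nat) : n &&& 128 = (n >>> 7 &&& 1) * 128 := by
  have h1 : n &&& 128 = (n.testBit 7).toNat * 128 := by
    have := Nat.and_two_pow n 7; norm_num at this; exact this
  have h2 : n >>> 7 &&& 1 = ((n >>> 7).testBit 0).toNat := by
    simpa using Nat.and_two_pow (n >>> 7) 0
  rw [h1, h2, Nat.testBit_shiftRight]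

lemma nat_hi_neg (m : Nat) : 128 - (128 &&& m) = (1 - (1 &&& (m >>> 7))) * 128 := by
  have h1 : 128 &&& m = (m.testBit 7).toNat * 128 := by
    have := Nat.and_two_pow m 7; norm_num at this; rw [Nat.and_comm]; exact this
  have h2 : 1 &&& (m >>> 7) = (m.testBit 7).toNat := by
    rw [Nat.and_comm]
    have := Nat.and_two_pow (m >>> 7) 0
    simpa [Nat.testBit_shiftRight] using this
  rw [h1, h2]; cases m.testBit 7 <;> simp

-- the two ports extract the high bit of a byte differently; these reconcile them
lemma hi_bit (e : Int) : PySem.Int.band e 128 = PySem.Int.band (e >>> (7:Nat)) 1 * 128 := by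
  cases e with
  | ofNat n =>
      have hs : (Int.ofNat n) >>> (7:Nat) = Int.ofNat (n >>> 7) := rfl
      rw [hs]
      have h1 : PySem.Int.band (Int.ofNat n) 128 = ((n &&& 128 : Nat) : Int) := by
        exact_mod_cast PySem.Int.band_natCast n 128
      have h2 : PySem.Int.band (Int.ofNat (n >>> 7)) 1 = ((n >>> 7 &&& 1 : Nat) : Int) := by
        exact_mod_cast PySem.Int.band_natCast (n >>> 7) 1
      rw [h1, h2, nat_hi n]; push_cast; ring
  | negSucc m =>
      have hs : (Int.negSucc m) >>> (7:Nat) = Int.negSucc (m >>> 7) := rfl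
      rw [hs]
      have h1 : PySem.Int.band (Int.negSucc m) 128 = ((128 - (128 &&& m) : Nat) : Int) := by
        simp only [PySem.Int.band]
        norm_num
        constructor
      have h2 : PySem.Int.band (Int.negSucc (m >>> 7)) 1 = ((1 - (1 &&& (m >>> 7)) : Nat) : Int) := by
        simp only [PySem.Int.band]
        norm_num
        constructor
      have hle : 1 &&& (m >>> 7) ≤ 1 := Nat.and_le_left
      rw [h1, h2, nat_hi_neg m, Nat.cast_mul, Nat.cast_sub hle]
      push_cast; ring

lemma band_one_cases (x : Int) : PySem.Int.band x 1 = 0 ∨ PySem.Int.band x 1 = 1 := by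
  rw [PySem.Int.band_one]
  have h1 := PySem.Int.mod_nonneg x (b := 2) (by omega)
  have h2 := PySem.Int.mod_lt x (b := 2) (by omega)
  omega

lemma shift_bit (e : Int) (k : Nat) (hk : k ≤ 7) :
    (PySem.Int.band e 128) >>> (7 - k) = (PySem.Int.band (e >>> (7:Nat)) 1) <<< k := by
  rw [hi_bit e]
  rcases band_one_cases (e >>> (7:Nat)) with h | h <;> rw [h] <;> interval_cases k <;> decide

-- A's msb accumulator over a chunk, and its agreement with B's syxMsb
def msbA : List Int → Int → Int → Int
  | [], _, b => b
  | e :: c, cnt, b => msbA c (cnt - 1) (PySem.Int.bor b ((PySem.Int.band e 128) >>> cnt.toNat))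

lemma msbA_append_singleton (u : List Int) (x : Int) : ∀ (cnt b : Int),
    msbA (u ++ [x]) cnt b
      = PySem.Int.bor (msbA u cnt b) ((PySem.Int.band x 128) >>> (cnt - u.length).toNat) := by
  induction u with
  | nil => intro cnt b; simp [msbA]
  | cons y u' ih =>
      intro cnt b
      simp only [List.cons_append, msbA, ih]
      congr 2
      simp only [List.length_cons]
      push_cast
      omega

lemma msbFold : ∀ (c : List Int) (k : Nat) (acc : Int), c.length + k ≤ 7 →
    msbA c (7 - (k : Int)) acc =
      (PySem.List.enumerate c (k : Int)).foldl
        (fun m jc =>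
          match jc with
          | (j, cc) => PySem.Int.bor m ((PySem.Int.band (cc >>> (7 : Nat)) 1) <<< j.toNat)) acc := by
  intro c
  induction c with
  | nil => intro k acc h; simp [msbA, PySem.List.enumerate]
  | cons x c' ih =>
      intro k acc h
      rw [PySem.List.enumerate_cons]
      simp only [List.foldl_cons, msbA]
      have hk : k ≤ 6 := by simp at h; omega
      have h1 : ((7 : Int) - (k : Int)).toNat = 7 - k := by omega
      have h2 : (PySem.Int.band x 128) >>> (7 - k) = (PySem.Int.band (x >>> (7:Nat)) 1) <<< k :=
        shift_bit x k (by omega)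
      have h3 : ((k : Int)).toNat = k := by omega
      rw [h1, h2, h3]
      have h4 : (7 : Int) - (k : Int) - 1 = 7 - ((k+1 : Nat) : Int) := by push_cast; ring
      have h5 : (k : Int) + 1 = ((k+1 : Nat) : Int) := by push_cast; ring
      rw [h4, h5, ih (k+1) _ (by simp at h ⊢; omega)]

lemma msbA_eq_syxMsb (c : List Int) (hc : c.length ≤ 7) : msbA c 7 0 = syxMsb c := by
  have := msbFold c 0 0 (by omega)
  simpa [syxMsb] using this

-- recursive 7-byte chunk decomposition; both ports are related to it
def chunkRec : List Int → List Int
  | [] => []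
  | x :: xs =>
      (syxMsb ((x :: xs).take 7) :: ((x :: xs).take 7).map (fun c => PySem.Int.band c (Int.not 128)))
        ++ chunkRec ((x :: xs).drop 7)
  termination_by l => l.length
  decreasing_by simp

lemma chunkRec_ne_nil (l : List Int) (h : l ≠ []) :
    chunkRec l = (syxMsb (l.take 7) :: (l.take 7).map (fun c => PySem.Int.band c (Int.not 128)))
      ++ chunkRec (l.drop 7) := by
  cases l with
  | nil => exact absurd rfl h
  | cons x xs => simp only [chunkRec]

lemma length_chunkRec : ∀ (n : Nat) (l : List Int), l.length = n →
    (chunkRec l).length = l.length + (l.length + 6) / 7 := by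
  intro n
  induction n using Nat.strong_induction_on with
  | _ n ih =>
    intro l hlen
    cases l with
    | nil => simp [chunkRec]
    | cons x xs =>
        rw [chunkRec_ne_nil _ (by simp)]
        have hdl : ((x :: xs).drop 7).length = (x :: xs).length - 7 := by simp
        have hn1 : 1 ≤ n := by rw [← hlen]; simp
        rw [List.length_append, List.length_cons, List.length_map, List.length_take,
            ih (((x :: xs).drop 7).length) (by rw [hdl, hlen]; omega) _ rfl, hdl]
        simp
        omega

-- processing a chunk prefix of A's loop that never flushes
lemma fold_noflush (lng : Int) : ∀ (c : List Int) (i0 : Int) (lst : List (List Int))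
    (tmp : List Int) (b cnt lim : Int),
    (∀ j : Nat, j < c.length → cnt - (j + 1) ≠ (if lng < 7 then 7 - lng else lim)) →
    (PySem.List.enumerate c i0).foldl (syxStep lng) (lst, tmp, b, cnt, lim) =
      (lst, tmp ++ c.map (fun e => PySem.Int.band e (Int.not 128)), msbA c cnt b, cnt - c.length,
       if c = [] then lim else (if lng < 7 then 7 - lng else lim)) := by
  intro c
  induction c with
  | nil => intro i0 lst tmp b cnt lim h; simp [PySem.List.enumerate, msbA]
  | cons e c' ih =>
      intro i0 lst tmp b cnt lim h
      rw [PySem.List.enumerate_cons]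
      simp only [List.foldl_cons]
      have hne : cnt - 1 ≠ (if lng < 7 then 7 - lng else lim) := by
        have := h 0 (by simp)
        simpa using this
      have hstep : syxStep lng (lst, tmp, b, cnt, lim) (i0, e)
          = (lst, tmp ++ [PySem.Int.band e (Int.not 128)],
             PySem.Int.bor b ((PySem.Int.band e 128) >>> cnt.toNat), cnt - 1,
             if lng < 7 then 7 - lng else lim) := by
        simp only [syxStep]
        rw [if_neg hne]
      rw [hstep]
      rw [ih (i0 + 1) lst _ _ (cnt - 1) (if lng < 7 then 7 - lng else lim) ?_]
      · have hlim : (if lng < 7 then 7 - lng else (if lng < 7 then 7 - lng else lim))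
            = (if lng < 7 then 7 - lng else lim) := by
          by_cases hl : lng < 7 <;> simp [hl]
        rw [hlim]
        simp only [List.map_cons, msbA, List.length_cons, List.append_assoc, List.singleton_append,
          Prod.mk.injEq]
        refine ⟨by trivial, by trivial, by trivial, by push_cast; ring, ?_⟩
        by_cases hc : c' = [] <;> simp [hc]
      · intro j hj
        have := h (j + 1) (by simp; omega)
        have hlim : (if lng < 7 then 7 - lng else (if lng < 7 then 7 - lng else lim))
            = (if lng < 7 then 7 - lng else lim) := by
          by_cases hl : lng < 7 <;> simp [hl]
        rw [hlim]
        intro hcon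
        apply this
        push_cast at hcon ⊢
        omega

-- A's loop on a suffix of length n starting from a fresh chunk state, lng ≥ 7
lemma main_big : ∀ (n : Nat) (rest : List Int), rest.length = n → ∀ (lng i0 : Int)
    (lst : List (List Int)) (lim : Int),
    7 ≤ lng → lng = i0 + n → lim = (if (n : Int) ≤ 5 then 7 - (n : Int) else 0) →
    (((PySem.List.enumerate rest i0).foldl (syxStep lng) (lst, [], 0, 7, lim)).1).flatten
      = lst.flatten ++ chunkRec (rest.take (n - (if n % 7 = 6 then 6 else 0))) := by
  intro n
  induction n using Nat.strong_induction_on with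
  | _ n ih =>
    intro rest hlen lng i0 lst lim h7 hlng hlim
    have hl : ¬ lng < 7 := by omega
    by_cases hn0 : n = 0
    · subst hn0
      have : rest = [] := List.eq_nil_of_length_eq_zero hlen
      subst this
      simp [PySem.List.enumerate, chunkRec]
    by_cases hn5 : n ≤ 5
    -- case 1 ≤ n ≤ 5 : single short chunk, flush at the last element
    · have hlim' : lim = 7 - (n : Int) := by rw [hlim, if_pos (by exact_mod_cast Nat.cast_le.mpr hn5)]
      obtain ⟨u, x, rfl⟩ : ∃ u x, rest = u ++ [x] := by
        rcases List.eq_nil_or_concat rest with h | ⟨u, x, h⟩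
        · subst h; simp at hlen; omega
        · exact ⟨u, x, by rw [h, List.concat_eq_append]⟩
      have hu : u.length = n - 1 := by simp at hlen; omega
      rw [PySem.List.enumerate_append, List.foldl_append]
      have hnf : ∀ j : Nat, j < u.length → (7 : Int) - (j + 1) ≠ (if lng < 7 then 7 - lng else lim) := by
        intro j hj
        rw [if_neg hl, hlim']
        have : j + 1 ≤ n - 1 := by omega
        omega
      rw [fold_noflush lng u i0 lst [] 0 7 lim hnf, PySem.List.enumerate_cons]
      simp only [PySem.List.enumerate_nil, List.foldl_cons, List.foldl_nil]
      have hmid : (if u = [] then lim else (if lng < 7 then 7 - lng else lim)) = 7 - (n : Int) := by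
        by_cases hu0 : u = [] <;> simp [hu0, if_neg hl, hlim']
      rw [hmid]
      have hstep : syxStep lng (lst, [] ++ u.map (fun e => PySem.Int.band e (Int.not 128)),
            msbA u 7 0, 7 - (u.length : Int), 7 - (n : Int)) ((i0 + u.length : Int), x)
          = (lst ++ [[PySem.Int.bor (msbA u 7 0) ((PySem.Int.band x 128) >>> ((7 : Int) - (u.length : Int)).toNat)],
              [] ++ u.map (fun e => PySem.Int.band e (Int.not 128)) ++ [PySem.Int.band x (Int.not 128)]],
             [], 0, 7,
             if lng - (i0 + u.length) < 7 then 7 - (lng - (i0 + u.length)) + 1 else 7 - (n : Int)) := by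
        simp only [syxStep, if_neg hl]
        rw [if_pos (by rw [hu]; omega)]
      rw [hstep]
      have hb : PySem.Int.bor (msbA u 7 0) ((PySem.Int.band x 128) >>> ((7 : Int) - (u.length : Int)).toNat)
          = syxMsb (u ++ [x]) := by
        rw [← msbA_append_singleton u x 7 0, msbA_eq_syxMsb _ (by simp at hlen ⊢; omega)]
      have hrhs : (u ++ [x]).take (n - (if n % 7 = 6 then 6 else 0)) = u ++ [x] := by
        rw [if_neg (by omega), Nat.sub_zero, ← hlen, List.take_length]
      rw [hrhs, chunkRec_ne_nil _ (by simp)]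
      have htk : (u ++ [x]).take 7 = u ++ [x] := List.take_of_length_le (by simp at hlen ⊢; omega)
      have hdr : (u ++ [x]).drop 7 = [] := List.drop_eq_nil_of_le (by simp at hlen ⊢; omega)
      rw [htk, hdr, hb]
      simp [chunkRec]
    by_cases hn6 : n = 6
    -- case n = 6 : A never flushes, the pending bytes are dropped
    · subst hn6
      have hnf : ∀ j : Nat, j < rest.length → (7 : Int) - (j + 1) ≠ (if lng < 7 then 7 - lng else lim) := by
        intro j hj
        rw [if_neg hl, hlim]
        norm_num
        omega
      rw [fold_noflush lng rest i0 lst [] 0 7 lim hnf]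
      simp [chunkRec]
    -- case n ≥ 7 : full chunk, flush at the 7th element, recurse
    · have hn7 : 7 ≤ n := by omega
      have hlim0 : lim = 0 := by rw [hlim, if_neg (by omega)]
      have h6l : 6 < rest.length := by omega
      have hx : rest.take 7 = rest.take 6 ++ [rest[6]] := by
        rw [List.take_add_one, List.getElem?_eq_getElem h6l]
        rfl
      have hsplit : rest = rest.take 6 ++ [rest[6]] ++ rest.drop 7 := by
        conv_lhs => rw [← List.take_append_drop 7 rest]
        rw [hx]
      have hulen : (rest.take 6).length = 6 := by simp; omega
      have hrlen : (rest.drop 7).length = n - 7 := by simp; omega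
      conv_lhs => rw [hsplit]
      rw [PySem.List.enumerate_append, List.foldl_append,
          PySem.List.enumerate_append, List.foldl_append]
      have hnf : ∀ j : Nat, j < (rest.take 6).length → (7 : Int) - (j + 1) ≠ (if lng < 7 then 7 - lng else lim) := by
        intro j hj
        rw [if_neg hl, hlim0]
        rw [hulen] at hj
        omega
      rw [fold_noflush lng _ i0 lst [] 0 7 lim hnf, PySem.List.enumerate_cons]
      simp only [PySem.List.enumerate_nil, List.foldl_cons, List.foldl_nil]
      have hmid : (if rest.take 6 = [] then lim else (if lng < 7 then 7 - lng else lim)) = 0 := by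
        have : rest.take 6 ≠ [] := by
          intro hc; rw [hc] at hulen; simp at hulen
        simp [this, if_neg hl, hlim0]
      rw [hmid]
      set B := PySem.Int.bor (msbA (rest.take 6) 7 0)
          ((PySem.Int.band rest[6] 128) >>> ((7 : Int) - ((rest.take 6).length : Int)).toNat) with hB
      have hstep : syxStep lng (lst, [] ++ (rest.take 6).map (fun e => PySem.Int.band e (Int.not 128)),
            msbA (rest.take 6) 7 0, 7 - ((rest.take 6).length : Int), 0) ((i0 + (rest.take 6).length : Int), rest[6])
          = (lst ++ [[B],
              [] ++ (rest.take 6).map (fun e => PySem.Int.band e (Int.not 128)) ++ [PySem.Int.band rest[6] (Int.not 128)]],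
             [], 0, 7,
             if lng - (i0 + ((rest.take 6).length : Int)) < 7 then 7 - (lng - (i0 + ((rest.take 6).length : Int))) + 1 else 0) := by
        simp only [syxStep, if_neg hl, hB]
        rw [if_pos (by rw [hulen]; omega)]
      rw [hstep]
      -- apply the induction hypothesis to the tail
      have hstart : i0 + (((rest.take 6 ++ [rest[6]]).length : Nat) : Int) = i0 + 7 := by
        simp
        omega
      rw [hstart]
      have hihlim : (if lng - (i0 + ((rest.take 6).length : Int)) < 7 then 7 - (lng - (i0 + ((rest.take 6).length : Int))) + 1 else 0)
          = (if ((n - 7 : Nat) : Int) ≤ 5 then 7 - ((n - 7 : Nat) : Int) else 0) := by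
        rw [hulen]
        split_ifs <;> omega
      rw [hihlim]
      rw [ih (n - 7) (by omega) (rest.drop 7) hrlen lng (i0 + 7) _ _ h7 (by omega) rfl]

      -- both sides are flatten of lst ++ [[B], chunk-bytes] followed by the recursive tail
      have hd : (if (n - 7) % 7 = 6 then 6 else 0) = (if n % 7 = 6 then 6 else 0) := by
        rcases Nat.lt_or_ge n 14 with h | h <;> split_ifs <;> omega
      have hBmsb : B = syxMsb (rest.take 7) := by
        rw [hB, ← msbA_append_singleton _ _ 7 0, ← hx,
            msbA_eq_syxMsb _ (by simp)]
      have hd7 : 7 ≤ n - (if n % 7 = 6 then 6 else 0) := by split_ifs <;> omega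
      have htkne : rest.take (n - (if n % 7 = 6 then 6 else 0)) ≠ [] := by
        intro hc
        have := congrArg List.length hc
        rw [List.length_take] at this
        simp only [List.length_nil] at this
        omega
      rw [chunkRec_ne_nil _ htkne]
      have htk7 : (rest.take (n - (if n % 7 = 6 then 6 else 0))).take 7 = rest.take 7 := by
        rw [List.take_take]
        congr 1
        omega
      have hdrop7 : (rest.take (n - (if n % 7 = 6 then 6 else 0))).drop 7
          = (rest.drop 7).take ((n - 7) - (if (n - 7) % 7 = 6 then 6 else 0)) := by
        rw [List.drop_take, hd]
        congr 1
        omega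
      rw [htk7, ← hdrop7, hBmsb, hx]
      simp
      have hmap7 : List.take 7 (List.map (fun e => PySem.Int.band e (Int.not 128)) rest)
          = List.take 6 (List.map (fun e => PySem.Int.band e (Int.not 128)) rest)
            ++ [PySem.Int.band rest[6] (Int.not 128)] := by
        rw [← List.map_take, ← List.map_take, hx, List.map_append]
        simp
      rw [hmap7]
      simp

-- A on inputs shorter than 7 (the in-loop 'lng < 7' override arms the flush)
lemma main_small (byt : List Int) (h : byt.length < 7) : syx_enc byt = chunkRec byt := by
  rcases List.eq_nil_or_concat byt with hnil | ⟨u, x, hc⟩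
  · subst hnil; simp [syx_enc, PySem.List.enumerate, chunkRec]
  rw [List.concat_eq_append] at hc
  subst hc
  have hl : ((u ++ [x]).length : Int) < 7 := by exact_mod_cast h
  unfold syx_enc
  simp only []
  rw [PySem.List.enumerate_append, List.foldl_append]
  have hnf : ∀ j : Nat, j < u.length →
      (7 : Int) - (j + 1) ≠ (if ((u ++ [x]).length : Int) < 7 then 7 - ((u ++ [x]).length : Int) else 0) := by
    intro j hj
    rw [if_pos hl]
    simp only [List.length_append, List.length_singleton]
    push_cast
    omega
  rw [fold_noflush _ u 0 [] [] 0 7 0 hnf, PySem.List.enumerate_cons]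
  simp only [PySem.List.enumerate_nil, List.foldl_cons, List.foldl_nil]
  have hmid : (if u = [] then (0:Int) else (if ((u ++ [x]).length : Int) < 7 then 7 - ((u ++ [x]).length : Int) else 0))
      = if u = [] then 0 else 7 - ((u ++ [x]).length : Int) := by
    have hlen2 : (u ++ [x]).length = u.length + 1 := by simp
    rcases eq_or_ne u [] with hu0 | hu0
    · simp [hu0]
    · simp [hu0]
      omega
  rw [hmid]
  have hstep : syxStep ((u ++ [x]).length : Int)
        ([], [] ++ u.map (fun e => PySem.Int.band e (Int.not 128)), msbA u 7 0, 7 - (u.length : Int),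
          if u = [] then 0 else 7 - ((u ++ [x]).length : Int)) ((0 + u.length : Int), x)
      = ([[PySem.Int.bor (msbA u 7 0) ((PySem.Int.band x 128) >>> ((7 : Int) - (u.length : Int)).toNat)],
          [] ++ u.map (fun e => PySem.Int.band e (Int.not 128)) ++ [PySem.Int.band x (Int.not 128)]],
         [], 0, 7,
         if ((u ++ [x]).length : Int) - (0 + (u.length : Int)) < 7
           then 7 - (((u ++ [x]).length : Int) - (0 + (u.length : Int))) + 1
           else if u = [] then 0 else 7 - ((u ++ [x]).length : Int)) := by
    simp only [syxStep, if_pos hl]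
    rw [if_pos (by simp; omega)]
    simp
  rw [hstep]
  have hb : PySem.Int.bor (msbA u 7 0) ((PySem.Int.band x 128) >>> ((7 : Int) - (u.length : Int)).toNat)
      = syxMsb (u ++ [x]) := by
    rw [← msbA_append_singleton u x 7 0, msbA_eq_syxMsb _ (by omega)]
  rw [chunkRec_ne_nil _ (by simp)]
  have htk : (u ++ [x]).take 7 = u ++ [x] := List.take_of_length_le (by omega)
  have hdr : (u ++ [x]).drop 7 = [] := List.drop_eq_nil_of_le (by omega)
  rw [htk, hdr, hb]
  simp [chunkRec]

-- B's range-over-chunks fold equals the recursive decomposition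
lemma pr7_nil (a b : Int) (h : b ≤ a) : PySem.List.pyRange a b 7 = [] := by
  simp only [PySem.List.pyRange]
  rw [if_neg (by omega : ¬ (7:Int) = 0), if_pos (by omega : (0:Int) < 7), if_neg (by omega : ¬ a < b)]
  simp

lemma pr7_cons (a b : Int) (h : a < b) : PySem.List.pyRange a b 7 = a :: PySem.List.pyRange (a + 7) b 7 := by
  simp only [PySem.List.pyRange]
  rw [if_neg (by omega : ¬ (7:Int) = 0), if_neg (by omega : ¬ (7:Int) = 0),
      if_pos (by omega : (0:Int) < 7), if_pos (by omega : (0:Int) < 7), if_pos h]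
  have hc : ((b - a + 7 - 1) / 7).toNat
      = (if a + 7 < b then ((b - (a + 7) + 7 - 1) / 7).toNat else 0) + 1 := by
    split_ifs <;> omega
  rw [hc, List.range_succ_eq_map, List.map_cons, List.map_map]
  congr 1
  · simp
  · apply List.map_congr_left
    intro k _
    simp [Nat.succ_eq_add_one]
    ring

lemma alt_fold (byt : List Int) : ∀ (m : Nat) (i0 : Nat) (acc : List Int),
    byt.length ≤ i0 + m →
    (PySem.List.pyRange (i0 : Int) byt.length 7).foldl
      (fun out i =>
        let chunk := PySem.List.slice byt (some i) (some (i + 7))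
        (out ++ [syxMsb chunk]) ++ chunk.map (fun c => PySem.Int.band c (Int.not 128))) acc
      = acc ++ chunkRec (byt.drop i0) := by
  intro m
  induction m with
  | zero =>
      intro i0 acc h
      rw [pr7_nil _ _ (by exact_mod_cast Nat.cast_le.mpr (by omega))]
      rw [List.drop_eq_nil_of_le (by omega)]
      simp [chunkRec]
  | succ m ihm =>
      intro i0 acc h
      by_cases hlt : i0 < byt.length
      · rw [pr7_cons _ _ (by exact_mod_cast hlt)]
        simp only [List.foldl_cons]
        have hchunk : PySem.List.slice byt (some (i0 : Int)) (some ((i0 : Int) + 7))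
            = (byt.drop i0).take 7 := by
          have : ((i0 : Int) + 7) = ((i0 + 7 : Nat) : Int) := by push_cast; ring
          rw [this, PySem.List.slice_natCast]
          congr 1
          omega
        have hcast : (i0 : Int) + 7 = ((i0 + 7 : Nat) : Int) := by push_cast; ring
        rw [hchunk, hcast, ihm (i0 + 7) _ (by omega)]
        rw [chunkRec_ne_nil (byt.drop i0) (by
          intro hc
          have := congrArg List.length hc
          simp at this
          omega)]
        rw [List.drop_drop]
        have : i0 + 7 = 7 + i0 := by omega
        rw [this]
        simp
      · rw [pr7_nil _ _ (by exact_mod_cast Nat.cast_le.mpr (by omega))]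
        rw [List.drop_eq_nil_of_le (by omega)]
        simp [chunkRec]

lemma alt_eq_chunkRec (byt : List Int) : syx_enc_alt byt = chunkRec byt := by
  unfold syx_enc_alt
  have h0 : (0 : Int) = ((0 : Nat) : Int) := rfl
  rw [h0, alt_fold byt byt.length 0 [] (by omega)]
  simp

lemma syx_enc_eq (byt : List Int) (h7 : 7 ≤ byt.length) :
    syx_enc byt = chunkRec (byt.take (byt.length - (if byt.length % 7 = 6 then 6 else 0))) := by
  unfold syx_enc
  simp only []
  rw [main_big byt.length byt rfl (byt.length : Int) 0 [] 0
      (by exact_mod_cast Nat.cast_le.mpr h7) (by ring)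
      (by rw [if_neg (by exact_mod_cast (by omega : ¬ (byt.length : Int) ≤ 5))])]
  simp

theorem final_unchanged (byt : List Int) (hD : ¬ D_syx_enc byt) : syx_enc byt = syx_enc_alt byt := by
  rw [alt_eq_chunkRec]
  by_cases h7 : byt.length < 7
  · exact main_small byt h7
  · have h7' : 7 ≤ byt.length := by omega
    have hm : byt.length % 7 ≠ 6 := fun hc => hD ⟨h7', hc⟩
    rw [syx_enc_eq byt h7', if_neg hm, Nat.sub_zero, List.take_length]

theorem final_tight (byt : List Int) (hD : D_syx_enc byt) : syx_enc byt ≠ syx_enc_alt byt := by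
  obtain ⟨h7, hm⟩ := hD
  rw [alt_eq_chunkRec, syx_enc_eq byt h7, if_pos hm]
  intro hc
  have := congrArg List.length hc
  rw [length_chunkRec _ _ rfl, length_chunkRec _ _ rfl, List.length_take] at this
  omega

-- ===== VERDICT (by name: the statement is the Claim_ definition above) =====
theorem syx_enc_spec : Claim_unchanged_syx_enc := by
  intro byt _ hD
  exact final_unchanged byt hD

theorem syx_enc_changed : Claim_changed_syx_enc := by
  unfold Claim_changed_syx_enc; decide

theorem syx_enc_tight : Claim_exact_syx_enc := by
  intro byt _ hD
  exact final_tight byt hD
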